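-- pv_equiv track=rewrite | github.com/Jorge-Bioinf/Contact_analysis_RNA | check_contacts.py | get_loop_rows
-- ===== SOURCE A (Python) =====
-- from typing import Dict, List, Optional, Tuple, Any
--
-- def _clean_token(tok: Optional[str]) -> Optional[str]:
--     if tok is None:
--         return None
--     tok = tok.strip()
--     if tok in {"?", "."}:
--         return None
--     return tok
--
-- def get_loop_rows(loops: Dict[str, List[str]], prefix: str) -> List[Dict[str, Optional[str]]]:
--     cols = [k for k in loops if k.startswith(prefix)]
--     if not cols:
--         return []
--
--     lengths = {len(loops[c]) for c in cols}
--     if len(lengths) != 1: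
--         raise ValueError(f"Inconsistent loop lengths for prefix {prefix}")
--
--     nrows = lengths.pop()
--     rows: List[Dict[str, Optional[str]]] = []
--     for i in range(nrows):
--         row: Dict[str, Optional[str]] = {}
--         for col in cols:
--             row[col[len(prefix):]] = _clean_token(loops[col][i])
--         rows.append(row)
--     return rows
-- ===== SOURCE B (Python) =====
-- from typing import Dict, List, Optional, Tuple
--
--
-- def _clean_token(tok: Optional[str]) -> Optional[str]:
--     if tok is None:
--         return None
--     tok = tok.strip()
--     if tok in {"?", "."}:
--         return None
--     return tok
--
--
-- def _build(pairs: List[Tuple[str, List[Optional[str]]]]) -> List[Dict[str, Optional[str]]]: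
--     # recursion on the columns: one column gives singleton row dicts,
--     # otherwise merge the head column's singletons into the recursively built rest
--     (name, vals), rest = pairs[0], pairs[1:]
--     head = [{name: v} for v in vals]
--     if not rest:
--         return head
--     return [{**h, **t} for h, t in zip(head, _build(rest))]
--
--
-- def get_loop_rows(loops: Dict[str, List[str]], prefix: str) -> List[Dict[str, Optional[str]]]:
--     cols = [k for k in loops if k.startswith(prefix)]
--     if not cols:
--         return []
--
--     lengths = {len(loops[c]) for c in cols}
--     if len(lengths) != 1:
--         raise ValueError(f"Inconsistent loop lengths for prefix {prefix}")
--
--     return _build([(c[len(prefix):], [_clean_token(v) for v in loops[c]]) for c in cols])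
-- ===== Notes on version B (the rewrite author's own statement) =====
-- stated objective: alternative
-- what changed: B replaces A's row-index double loop with a structural recursion over the selected columns: each column is cleaned into a list of per-row singleton dicts and the rows are produced by recursively dict-merging ({**h, **t}) the head column's singletons into the rows built from the remaining columns, with no row index at all.
-- outside the precondition, e.g. on get_loop_rows({'a': ['1'], 'ab': []}, 'a'): A raises ValueError, B raises ValueError
import Mathlib
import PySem

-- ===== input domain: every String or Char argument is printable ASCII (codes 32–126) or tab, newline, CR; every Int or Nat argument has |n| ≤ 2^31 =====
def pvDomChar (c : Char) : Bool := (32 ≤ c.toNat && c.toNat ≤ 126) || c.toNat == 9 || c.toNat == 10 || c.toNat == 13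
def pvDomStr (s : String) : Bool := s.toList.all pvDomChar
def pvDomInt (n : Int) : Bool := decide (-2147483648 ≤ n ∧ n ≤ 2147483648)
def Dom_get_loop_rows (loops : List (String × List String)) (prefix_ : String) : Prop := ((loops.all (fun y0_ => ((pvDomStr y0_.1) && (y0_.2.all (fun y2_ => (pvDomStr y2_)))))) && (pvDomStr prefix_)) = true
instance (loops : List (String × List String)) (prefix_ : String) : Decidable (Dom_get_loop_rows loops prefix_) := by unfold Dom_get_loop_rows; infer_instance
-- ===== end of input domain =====

-- B replaces A's row-index double loop by a structural recursion over the selected columns: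
-- singleton row dicts for one column, then per-row dict merges ({**h, **t}) of the head
-- column into the recursively built rest; objective: alternative.

-- ===== PORT A =====
-- _clean_token (called only with a str, never None, so the None branch is dropped)
def pvClean (tok : String) : Option String :=
  let t := PySem.Str.strip tok
  if t = "?" ∨ t = "." then none else some t

def get_loop_rows (loops : List (String × List String)) (prefix_ : String) : List (List (String × Option String)) :=
  let cols := loops.filter (fun p => PySem.Str.startswith p.1 prefix_)
  if cols = [] then []
  else
    let lengths : PySem.Set Nat := PySem.Set.ofList (cols.map (fun p => p.2.length))
    if lengths.length ≠ 1 then []  -- Python raises ValueError here; excluded by Pre_get_loop_rows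
    else
      -- lengths.pop() on the singleton set is its only element
      let nrows : Nat := lengths.headD 0
      (PySem.List.pyRange 0 (nrows : Int)).foldl (fun rows i =>
        rows ++ [(cols.foldl (fun (row : PySem.Dict String (Option String)) p =>
            row.insert (PySem.Str.slice p.1 (some (PySem.Str.len prefix_)) none)
              (pvClean (PySem.List.pyGetD p.2 i ""))) PySem.Dict.empty).items]) []

-- ===== PORT B =====
-- {**h, **t}: fold t's entries into h
def pvMergeInto (h t : PySem.Dict String (Option String)) : PySem.Dict String (Option String) :=
  t.items.foldl (fun d kv => d.insert kv.1 kv.2) h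

-- _build: recursion on the (short name, cleaned column) pairs
def pvBuild : List (String × List (Option String)) → List (PySem.Dict String (Option String))
  | [] => []
  | (name, vals) :: rest =>
    let head := vals.map (fun v => PySem.Dict.empty.insert name v)
    if rest = [] then head
    else (head.zip (pvBuild rest)).map (fun p => pvMergeInto p.1 p.2)

def get_loop_rows_alt (loops : List (String × List String)) (prefix_ : String) : List (List (String × Option String)) :=
  let cols := loops.filter (fun p => PySem.Str.startswith p.1 prefix_)
  if cols = [] then []
  else
    let lengths : PySem.Set Nat := PySem.Set.ofList (cols.map (fun p => p.2.length))
    if lengths.length ≠ 1 then []  -- Python raises ValueError here; excluded by Pre_get_loop_rows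
    else
      (pvBuild (cols.map (fun p =>
        (PySem.Str.slice p.1 (some (PySem.Str.len prefix_)) none, p.2.map pvClean)))).map
        PySem.Dict.items

-- ===== PRECONDITION & SPEC =====
-- Pre_ excludes (i) the inputs where A raises ValueError (two selected columns of different
-- lengths) and (ii) association lists with duplicate keys, which represent no Python dict
-- (loops is a dict, so its keys are unique).
def Pre_get_loop_rows (loops : List (String × List String)) (prefix_ : String) : Prop :=
  (loops.map Prod.fst).Nodup ∧
  ∀ p ∈ loops, ∀ q ∈ loops, PySem.Str.startswith p.1 prefix_ = true →
    PySem.Str.startswith q.1 prefix_ = true → p.2.length = q.2.length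

instance (loops : List (String × List String)) (prefix_ : String) : Decidable (Pre_get_loop_rows loops prefix_) := by unfold Pre_get_loop_rows; infer_instance

def pvWitness_get_loop_rows : (List (String × List String)) × String :=
  ([("a_x", ["1", "?"]), ("a_y", [" 7 ", "."]), ("b_z", ["u"])], "a_")

def Spec_get_loop_rows (loops : List (String × List String)) (prefix_ : String) (out : List (List (String × Option String))) : Prop := out = get_loop_rows_alt loops prefix_
instance (loops : List (String × List String)) (prefix_ : String) (out : List (List (String × Option String))) : Decidable (Spec_get_loop_rows loops prefix_ out) := by unfold Spec_get_loop_rows; infer_instance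

-- ===== CLAIM (what is proved, stated in full; the proofs are below) =====
def Claim_equal_get_loop_rows : Prop := ∀ (loops : List (String × List String)) (prefix_ : String), Dom_get_loop_rows loops prefix_ → Pre_get_loop_rows loops prefix_ → Spec_get_loop_rows loops prefix_ (get_loop_rows loops prefix_)

-- ===== LEMMAS AND PROOFS =====

-- set(l) of a nonempty list whose elements are all n is the singleton [n]
lemma pvSet_ofList_const {l : List Nat} {n : Nat} (hne : l ≠ []) (h : ∀ x ∈ l, x = n) :
    PySem.Set.ofList l = [n] := by
  have hmem : ∀ y ∈ PySem.Set.ofList l, y = n := by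
    intro y hy
    exact h y ((PySem.Set.mem_ofList l y).mp hy)
  have hnd := PySem.Set.nodup_ofList l
  have hn : n ∈ PySem.Set.ofList l := by
    rcases List.exists_mem_of_ne_nil l hne with ⟨x, hx⟩
    have hxn := h x hx
    exact (PySem.Set.mem_ofList l n).mpr (hxn ▸ hx)
  rcases hs : PySem.Set.ofList l with _ | ⟨a, t⟩
  · rw [hs] at hn; cases hn
  · rw [hs] at hmem hnd hn
    have ha : a = n := hmem a (by simp)
    rcases t with _ | ⟨b, t'⟩
    · rw [ha]
    · have hb : b = n := hmem b (by simp)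
      subst ha hb
      simp at hnd

-- a string that starts with `pre` is `pre` followed by its slice from len(pre)
lemma pvStartswith_recover (s pre : String) (h : PySem.Str.startswith s pre = true) :
    s.toList = pre.toList ++ (PySem.Str.slice s (some (PySem.Str.len pre)) none).toList := by
  have hp : pre.toList <+: s.toList := by
    have := h
    simp only [PySem.Str.startswith_eq] at this
    exact (PySem.Chars.startswith_iff _ _).mp this
  rcases hp with ⟨t, ht⟩
  have hlen : PySem.Str.len pre = ((pre.toList.length : Nat) : Int) := by
    simp [PySem.Str.len_eq]
  rw [hlen]
  simp only [PySem.Str.toList_slice, PySem.Chars.slice_eq_listSlice,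
    PySem.List.slice_from_natCast]
  rw [← ht, List.drop_left]

-- the slice short names of distinct keys that all start with `pre` are distinct
lemma pvShorts_nodup (ks : List String) (pre : String) (hnd : ks.Nodup)
    (hall : ∀ k ∈ ks, PySem.Str.startswith k pre = true) :
    (ks.map (fun k => PySem.Str.slice k (some (PySem.Str.len pre)) none)).Nodup := by
  apply List.Nodup.map_on _ hnd
  intro x hx y hy hxy
  have hxr := pvStartswith_recover x pre (hall x hx)
  have hyr := pvStartswith_recover y pre (hall y hy)
  apply String.toList_inj.mp
  rw [hxr, hyr, hxy]

-- {**h, **t} concatenates the items when the key sets are disjoint (t's keys unique)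
lemma pvMergeInto_items (h t : PySem.Dict String (Option String))
    (hnd : t.keys.Nodup) (hdisj : ∀ k ∈ t.keys, h.contains k = false) :
    (pvMergeInto h t).items = h.items ++ t.items := by
  unfold pvMergeInto
  have := PySem.Dict.items_foldl_insert_fresh (l := t.items) (k := Prod.fst)
    (v := Prod.snd) (d := h)
    (by intro a ha
        exact hdisj a.1 (by simp only [PySem.Dict.keys]; exact List.mem_map_of_mem ha))
    (by simpa only [PySem.Dict.keys] using hnd)
  simpa using this

-- vals.map f written as a map over the row indices
lemma pvMap_eq_range {α β : Type} (vals : List α) (n : Nat) (f : α → β) (d : α)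
    (h : vals.length = n) :
    vals.map f = (List.range n).map (fun i => f (vals.getD i d)) := by
  apply List.ext_getElem
  · simp [h]
  · intro i h1 h2
    simp only [List.getElem_map, List.getElem_range]
    have hi : i < vals.length := by simpa [h] using h1
    rw [List.getD_eq_getElem _ _ hi]

-- _build on nonempty pairs of common column length n and distinct names, row-indexed form
lemma pvBuild_spec (n : Nat) :
    ∀ pairs : List (String × List (Option String)), pairs ≠ [] →
      (∀ q ∈ pairs, q.2.length = n) → (pairs.map Prod.fst).Nodup →
      pvBuild pairs = (List.range n).map
        (fun i => PySem.Dict.mk (pairs.map (fun q => (q.1, q.2.getD i none)))) := by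
  intro pairs
  induction pairs with
  | nil => intro h; exact absurd rfl h
  | cons hd rest ih =>
    intro _ hlen hnd
    obtain ⟨name, vals⟩ := hd
    have hv : vals.length = n := hlen (name, vals) (by simp)
    have hsingle : ∀ v : Option String, PySem.Dict.empty.insert name v
        = PySem.Dict.mk [(name, v)] := by
      intro v
      apply PySem.Dict.ext
      simp [PySem.Dict.items_insert, PySem.Dict.empty]
    by_cases hr : rest = []
    · subst hr
      rw [pvBuild, if_pos rfl]
      rw [pvMap_eq_range vals n _ none hv]
      apply List.map_congr_left
      intro i _
      rw [hsingle]
      simp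
    · have hrne : rest ≠ [] := hr
      rw [pvBuild, if_neg hrne]
      have hlenr : ∀ q ∈ rest, q.2.length = n := fun q hq => hlen q (by simp [hq])
      rw [List.map_cons, List.nodup_cons] at hnd
      have hndr : (rest.map Prod.fst).Nodup := hnd.2
      have hname : name ∉ rest.map Prod.fst := hnd.1
      rw [ih hrne hlenr hndr]
      rw [pvMap_eq_range vals n (fun v => PySem.Dict.empty.insert name v) none hv,
        List.zip_map', List.map_map]
      apply List.map_congr_left
      intro i _
      simp only [Function.comp_apply]
      rw [hsingle]
      apply PySem.Dict.ext
      rw [pvMergeInto_items]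
      · simp
      · simp only [PySem.Dict.keys]
        simpa [List.map_map, Function.comp_def] using hndr
      · intro k hk
        simp only [PySem.Dict.keys, List.map_map] at hk
        rcases List.mem_map.mp hk with ⟨q, hq, hqk⟩
        simp only [Function.comp_apply] at hqk
        have : k ∈ rest.map Prod.fst := by
          rw [← hqk]; exact List.mem_map_of_mem hq
        have hkne : ¬ name = k := fun he => hname (he ▸ this)
        simp [PySem.Dict.contains_mk, hkne]

-- A's per-row insert loop over distinct short names appends: its items are the map
lemma pvRowA_items (cols : List (String × List String)) (prefix_ : String) (i : Int)
    (hnd : (cols.map (fun p =>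
      PySem.Str.slice p.1 (some (PySem.Str.len prefix_)) none)).Nodup) :
    (cols.foldl (fun (row : PySem.Dict String (Option String)) p =>
        row.insert (PySem.Str.slice p.1 (some (PySem.Str.len prefix_)) none)
          (pvClean (PySem.List.pyGetD p.2 i ""))) PySem.Dict.empty).items
      = cols.map (fun p => (PySem.Str.slice p.1 (some (PySem.Str.len prefix_)) none,
          pvClean (PySem.List.pyGetD p.2 i ""))) := by
  have := PySem.Dict.items_foldl_insert_fresh (l := cols)
    (k := fun p => PySem.Str.slice p.1 (some (PySem.Str.len prefix_)) none)
    (v := fun p => pvClean (PySem.List.pyGetD p.2 i ""))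
    (d := PySem.Dict.empty)
    (by intro a _; simp [PySem.Dict.contains_empty]) hnd
  simpa using this

-- ===== VERDICT (by name: the statement is the Claim_ definition above) =====
theorem get_loop_rows_spec : Claim_equal_get_loop_rows := by
  intro loops prefix_ _ hpre
  obtain ⟨hkeys, hpre⟩ := hpre
  unfold Spec_get_loop_rows get_loop_rows get_loop_rows_alt
  set cols := loops.filter (fun p => PySem.Str.startswith p.1 prefix_) with hcols
  by_cases hc : cols = []
  · simp [hc]
  · rw [if_neg hc, if_neg hc]
    -- all selected columns share one length n
    have hmem : ∀ q ∈ cols, q ∈ loops ∧ PySem.Str.startswith q.1 prefix_ = true := by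
      intro q hq
      rw [hcols] at hq
      exact ⟨(List.mem_filter.mp hq).1, by simpa using (List.mem_filter.mp hq).2⟩
    rcases List.exists_mem_of_ne_nil cols hc with ⟨p0, hp0⟩
    have hp0' := hmem p0 hp0
    have hlen : ∀ p ∈ cols, p.2.length = p0.2.length := by
      intro p hp
      have hp' := hmem p hp
      exact hpre p hp'.1 p0 hp0'.1 hp'.2 hp0'.2
    have hmapne : cols.map (fun p => p.2.length) ≠ [] := by simp [hc]
    have hconst : ∀ x ∈ cols.map (fun p => p.2.length), x = p0.2.length := by
      intro x hx
      rcases List.mem_map.mp hx with ⟨q, hq, rfl⟩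
      exact hlen q hq
    have hset : PySem.Set.ofList (cols.map (fun p => p.2.length)) = [p0.2.length] :=
      pvSet_ofList_const hmapne hconst
    rw [hset]
    have hone : ¬ (([p0.2.length] : List Nat).length ≠ 1) := by simp
    rw [if_neg hone, if_neg hone]
    simp only [List.headD_cons]
    -- distinctness of the short names
    have hknd : (cols.map Prod.fst).Nodup := by
      have hs : (cols.map Prod.fst).Sublist (loops.map Prod.fst) := by
        rw [hcols]; exact List.Sublist.map _ List.filter_sublist
      exact hkeys.sublist hs
    have hall : ∀ k ∈ cols.map Prod.fst, PySem.Str.startswith k prefix_ = true := by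
      intro k hk
      rcases List.mem_map.mp hk with ⟨q, hq, rfl⟩
      exact (hmem q hq).2
    have hshorts : (cols.map (fun p =>
        PySem.Str.slice p.1 (some (PySem.Str.len prefix_)) none)).Nodup := by
      have := pvShorts_nodup (cols.map Prod.fst) prefix_ hknd hall
      simpa [List.map_map, Function.comp_def] using this
    -- B side: pvBuild in row-indexed form
    have hpne : cols.map (fun p =>
        (PySem.Str.slice p.1 (some (PySem.Str.len prefix_)) none, p.2.map pvClean)) ≠ [] := by
      simp [hc]
    have hplen : ∀ q ∈ cols.map (fun p =>
        (PySem.Str.slice p.1 (some (PySem.Str.len prefix_)) none, p.2.map pvClean)),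
        q.2.length = p0.2.length := by
      intro q hq
      rcases List.mem_map.mp hq with ⟨p, hp, rfl⟩
      simp [hlen p hp]
    have hpnd : ((cols.map (fun p =>
        (PySem.Str.slice p.1 (some (PySem.Str.len prefix_)) none, p.2.map pvClean))).map
        Prod.fst).Nodup := by
      simpa [List.map_map, Function.comp_def] using hshorts
    rw [pvBuild_spec p0.2.length _ hpne hplen hpnd]
    -- A side: the append loop over range as a map
    rw [PySem.List.pyRange_zero_natCast, List.foldl_map,
      PySem.List.foldl_append_singleton_eq_map, List.nil_append, List.map_map]
    apply List.map_congr_left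
    intro k hk
    have hkn : k < p0.2.length := List.mem_range.mp hk
    simp only [Function.comp_apply]
    rw [pvRowA_items cols prefix_ (k : Int) hshorts]
    simp only [List.map_map]
    apply List.map_congr_left
    intro p hp
    simp only [Function.comp_apply]
    have hkp : k < p.2.length := by rw [hlen p hp]; exact hkn
    rw [PySem.List.pyGetD_natCast]
    rw [List.getD_eq_getElem _ _ hkp,
      List.getD_eq_getElem _ _ (show k < (p.2.map pvClean).length by simpa using hkp),
      List.getElem_map]
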